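-- pv_equiv track=rewrite | github.com/mosheng20205/demand_radar | radar/notify.py | _format_wecom_source_runs
-- ===== SOURCE A (Python) =====
-- from collections import Counter, defaultdict
--
-- def _escape_wecom(value: str) -> str:
--     return (value or "").replace("&", "&amp;").replace("<", "&lt;").replace(">", "&gt;")
--
-- def _format_wecom_source_runs(source_runs: list[tuple[str, str, int]]) -> list[str]:
--     grouped: dict[str, dict[str, int]] = defaultdict(lambda: defaultdict(int))
--     for source_name, status, count in source_runs:
--         grouped[str(source_name)][str(status)] += int(count or 0)
--
--     lines: list[str] = []
--     for index, source_name in enumerate(sorted(grouped), start=1):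
--         parts = [f"{status} {grouped[source_name][status]}" for status in sorted(grouped[source_name])]
--         lines.append(f"{index}. {_escape_wecom(source_name)} | {_escape_wecom(' | '.join(parts))}")
--     return lines
-- ===== SOURCE B (Python) =====
-- def _escape_wecom(value: str) -> str:
--     return (value or "").replace("&", "&amp;").replace("<", "&lt;").replace(">", "&gt;")
--
--
-- def _format_wecom_source_runs(source_runs: list[tuple[str, str, int]]) -> list[str]:
--     # Sort-first-then-grouped-scan instead of nested-dict accumulation.
--     rows = sorted(((str(s), str(st), int(c or 0)) for s, st, c in source_runs),
--                   key=lambda r: (r[0], r[1]))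
--     lines: list[str] = []
--     n = len(rows)
--     i = 0
--     num = 0
--     while i < n:
--         source = rows[i][0]
--         j = i
--         while j < n and rows[j][0] == source:
--             j += 1
--         grp = rows[i:j]
--         parts: list[str] = []
--         k = 0
--         while k < len(grp):
--             status = grp[k][1]
--             m = k
--             total = 0
--             while m < len(grp) and grp[m][1] == status:
--                 total += grp[m][2]
--                 m += 1
--             parts.append(f"{status} {total}")
--             k = m
--         num += 1
--         lines.append(f"{num}. {_escape_wecom(source)} | {_escape_wecom(' | '.join(parts))}")
--         i = j
--     return lines
-- ===== Notes on version B (the rewrite author's own statement) =====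
-- stated objective: alternative
-- what changed: Replaces the nested defaultdict accumulation followed by per-level key sorting with a sort-first pipeline: normalise rows, sort once by (source, status), then one linear scan over contiguous runs (outer run per source, inner run per status summing counts) emitting the numbered escaped lines.
import Mathlib
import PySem

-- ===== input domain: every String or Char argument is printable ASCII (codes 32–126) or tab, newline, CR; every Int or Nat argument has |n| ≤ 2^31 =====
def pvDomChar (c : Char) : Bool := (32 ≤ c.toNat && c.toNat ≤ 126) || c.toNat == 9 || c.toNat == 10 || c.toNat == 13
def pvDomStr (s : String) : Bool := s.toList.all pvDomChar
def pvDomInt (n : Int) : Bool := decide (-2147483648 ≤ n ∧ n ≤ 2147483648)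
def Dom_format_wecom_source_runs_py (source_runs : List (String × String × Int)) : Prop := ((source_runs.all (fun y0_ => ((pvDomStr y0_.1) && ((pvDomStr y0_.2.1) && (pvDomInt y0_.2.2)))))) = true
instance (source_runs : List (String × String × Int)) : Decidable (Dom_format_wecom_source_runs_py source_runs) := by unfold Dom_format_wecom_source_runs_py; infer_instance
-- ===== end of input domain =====

-- B replaces A's nested-defaultdict accumulation with per-level key sorts by a single sort on
-- (source, status) followed by one linear run-scan; same return value (alternative decomposition).

-- shared helper: _escape_wecom (identical helper in both Pythons)
def escapeWeCom (value : String) : String :=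
  PySem.Str.replace
    (PySem.Str.replace
      (PySem.Str.replace (if value == "" then "" else value) "&" "&amp;")
      "<" "&lt;")
    ">" "&gt;"

def format_wecom_source_runs_py (source_runs : List (String × String × Int)) : List String :=
  let grouped : PySem.Dict String (PySem.Dict String Int) :=
    source_runs.foldl
      (fun g r =>
        g.modify r.1 PySem.Dict.empty
          (fun inner => inner.modify r.2.1 0 (· + (if r.2.2 == 0 then 0 else r.2.2))))
      PySem.Dict.empty
  ((PySem.List.sorted grouped.keys (fun s => s) false).foldl
    (fun (st : List String × Int) s =>
      let inner := grouped.getD s PySem.Dict.empty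
      let parts := (PySem.List.sorted inner.keys (fun t => t) false).map
        (fun t => t ++ " " ++ PySem.Int.toStr (inner.getD t 0))
      (st.1 ++ [PySem.Int.toStr st.2 ++ ". " ++ escapeWeCom s ++ " | " ++
                escapeWeCom (PySem.Str.join " | " parts)],
       st.2 + 1))
    ([], 1)).1

def normRow (r : String × String × Int) : String × String × Int :=
  (r.1, r.2.1, if r.2.2 == 0 then 0 else r.2.2)

def runsBy {α κ : Type} [BEq κ] (key : α → κ) : List α → List (κ × List α)
  | [] => []
  | x :: xs =>
    (key x, x :: xs.takeWhile (fun y => key y == key x)) ::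
      runsBy key (xs.dropWhile (fun y => key y == key x))
  termination_by l => l.length
  decreasing_by
    simp only [List.length_cons]
    exact Nat.lt_succ_of_le (List.length_dropWhile_le _ _)

def mkLine (idx : Int) (src : String) (grp : List (String × String × Int)) : String :=
  let parts := (runsBy (fun r => r.2.1) grp).map
    (fun g => g.1 ++ " " ++ PySem.Int.toStr ((g.2.map (fun r => r.2.2)).sum))
  PySem.Int.toStr idx ++ ". " ++ escapeWeCom src ++ " | " ++
    escapeWeCom (PySem.Str.join " | " parts)

def emitLines (idx : Int) : List (String × List (String × String × Int)) → List String
  | [] => []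
  | g :: gs => mkLine idx g.1 g.2 :: emitLines (idx + 1) gs

def format_wecom_source_runs_py_alt (source_runs : List (String × String × Int)) : List String :=
  emitLines 1
    (runsBy (fun r => r.1)
      (PySem.List.sorted2 (source_runs.map normRow) (fun r => r.1) (fun r => r.2.1) false))

-- ===== PRECONDITION & SPEC =====
def Spec_format_wecom_source_runs_py (source_runs : List (String × String × Int)) (out : List String) : Prop := out = format_wecom_source_runs_py_alt source_runs
instance (source_runs : List (String × String × Int)) (out : List String) : Decidable (Spec_format_wecom_source_runs_py source_runs out) := by unfold Spec_format_wecom_source_runs_py; infer_instance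

-- ===== CLAIM (what is proved, stated in full; the proofs are below) =====
def Claim_equal_format_wecom_source_runs_py : Prop := ∀ (source_runs : List (String × String × Int)), Dom_format_wecom_source_runs_py source_runs → Spec_format_wecom_source_runs_py source_runs (format_wecom_source_runs_py source_runs)

-- ===== LEMMAS AND PROOFS =====

theorem sorted2_eq_sorted_lex (xs : List (String × String × Int)) :
    PySem.List.sorted2 xs (fun r => r.1) (fun r => r.2.1) false
      = PySem.List.sorted xs (fun r => toLex (r.1, r.2.1)) false := by
  have hb : (fun (a b : String × String × Int) =>
        decide (a.1 < b.1) || (!decide (b.1 < a.1) && decide (a.2.1 < b.2.1)))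
      = (fun (a b : String × String × Int) =>
        decide (toLex (a.1, a.2.1) < toLex (b.1, b.2.1))) := by
    funext a b
    rcases lt_trichotomy a.1 b.1 with h | h | h
    · simp [Prod.Lex.lt_iff, h, asymm h]
    · simp [Prod.Lex.lt_iff, h]
    · simp only [Prod.Lex.lt_iff, ofLex_toLex]
      simp [asymm h, h]
      intro he
      exact absurd h (by rw [he]; exact lt_irrefl _)
  rw [PySem.List.sorted_eq_foldl_insertBy]
  show List.foldl (fun acc x => PySem.List.insertBy (fun a b =>
        decide (a.1 < b.1) || (!decide (b.1 < a.1) && decide (a.2.1 < b.2.1))) x acc) [] xs = _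
  rw [hb]

theorem getD_inner (l : List (String × String × Int)) (d : PySem.Dict String Int) (t : String) :
    (l.foldl (fun d r => d.modify r.2.1 0 (· + r.2.2)) d).getD t 0
      = d.getD t 0 + ((l.filter (fun r => r.2.1 == t)).map (fun r => r.2.2)).sum := by
  induction l generalizing d with
  | nil => simp
  | cons r l ih =>
    simp only [List.foldl_cons, ih, PySem.Dict.getD_modify, List.filter_cons]
    by_cases h : r.2.1 = t
    · simp only [h, beq_self_eq_true, if_pos, List.map_cons, List.sum_cons]
      ring
    · simp [h, beq_iff_eq, Ne.symm h]

theorem getD_grouped (l : List (String × String × Int))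
    (g : PySem.Dict String (PySem.Dict String Int)) (s : String) :
    (l.foldl
      (fun g r => g.modify r.1 PySem.Dict.empty
        (fun inner => inner.modify r.2.1 0 (· + r.2.2))) g).getD s PySem.Dict.empty
      = (l.filter (fun r => r.1 == s)).foldl
          (fun d r => d.modify r.2.1 0 (· + r.2.2)) (g.getD s PySem.Dict.empty) := by
  induction l generalizing g with
  | nil => rfl
  | cons r l ih =>
    simp only [List.foldl_cons, ih, List.filter_cons, PySem.Dict.getD_modify]
    by_cases h : r.1 = s
    · simp [h]
    · simp [h, beq_iff_eq, Ne.symm h]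

theorem assemble (S : List String) (aLine : Int → String → String)
    (grp : String → List (String × String × Int))
    (h : ∀ s ∈ S, ∀ i, aLine i s = mkLine i s (grp s)) :
    ∀ (acc : List String) (i : Int),
      (S.foldl (fun st s => (st.1 ++ [aLine st.2 s], st.2 + 1)) (acc, i)).1
        = acc ++ emitLines i (S.map (fun s => (s, grp s))) := by
  induction S with
  | nil => intro acc i; simp [emitLines]
  | cons s S ih =>
    intro acc i
    simp only [List.foldl_cons, List.map_cons, emitLines]
    rw [ih (fun s hs => h s (List.mem_cons_of_mem _ hs)) (acc ++ [aLine i s]) (i + 1)]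
    simp [h s (List.mem_cons_self) i]

theorem runsBy_eq {α : Type} (key : α → String) (l : List α)
    (h : l.Pairwise (fun a b => key a ≤ key b)) :
    runsBy key l
      = (PySem.List.sorted (PySem.Set.ofList (l.map key)) (fun s => s) false).map
          (fun k => (k, l.filter (fun r => key r == k))) := by
  induction l using runsBy.induct key with
  | case1 => simp [runsBy, PySem.List.sorted_eq_nil_iff]
  | case2 x xs ih =>
    have hx : ∀ y ∈ xs, key x ≤ key y := (List.pairwise_cons.mp h).1
    have hxs : xs.Pairwise (fun a b => key a ≤ key b) := (List.pairwise_cons.mp h).2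
    set p := (fun y => key y == key x) with hp
    set run := xs.takeWhile p with hrundef
    set rest := xs.dropWhile p with hrestdef
    have hrestsub : rest.Sublist xs := List.dropWhile_sublist _
    have hrest : rest.Pairwise (fun a b => key a ≤ key b) := List.Pairwise.sublist hrestsub hxs
    have hrunkey : ∀ y ∈ run, key y = key x := by
      intro y hy
      have := List.mem_takeWhile_imp hy
      simpa [hp, beq_iff_eq] using this
    have hgt : ∀ y ∈ rest, key x < key y := by
      cases hr : rest with
      | nil => simp
      | cons r0 rest' =>
        have hne' : xs.dropWhile p ≠ [] := by rw [← hrestdef, hr]; simp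
        have hne : p r0 = false := by
          have h0 := List.head_dropWhile_not p hne'
          rwa [show (xs.dropWhile p).head hne' = r0 by
            simp only [← hrestdef, hr]; rfl] at h0
        have hr0 : key x < key r0 := by
          refine lt_of_le_of_ne (hx r0 (hrestsub.subset (by simp [hr]))) ?_
          intro he
          simp [hp, he.symm] at hne
        intro y hy
        rcases List.mem_cons.mp hy with rfl | hy'
        · exact hr0
        · have : key r0 ≤ key y := by
            have := (List.pairwise_cons.mp (hr ▸ hrest)).1
            exact this y hy'
          exact lt_of_lt_of_le hr0 this
    have hsplit : xs = run ++ rest := (List.takeWhile_append_dropWhile).symm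
    -- sorted distinct keys of l decompose as key x :: sorted distinct keys of rest
    have hsortedRest_nodup :
        (PySem.List.sorted (PySem.Set.ofList (rest.map key)) (fun s => s) false).Nodup :=
      ((PySem.List.sorted_perm _ _ false).nodup_iff).mpr (PySem.Set.nodup_ofList _)
    have hmemSR : ∀ a, a ∈ PySem.List.sorted (PySem.Set.ofList (rest.map key)) (fun s => s) false
        ↔ a ∈ rest.map key := by
      intro a
      rw [(PySem.List.sorted_perm _ _ false).mem_iff, PySem.Set.mem_ofList]
    have hs : PySem.List.sorted (PySem.Set.ofList ((x :: xs).map key)) (fun s => s) false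
        = key x :: PySem.List.sorted (PySem.Set.ofList (rest.map key)) (fun s => s) false := by
      apply PySem.List.sorted_eq_of_perm_of_pairwise_lt
      · refine (List.perm_ext_iff_of_nodup ?_ ?_).mpr ?_
        · refine List.nodup_cons.mpr ⟨?_, hsortedRest_nodup⟩
          intro hmem
          rcases List.mem_map.mp ((hmemSR _).mp hmem) with ⟨y, hy, hkey⟩
          exact absurd (hkey ▸ hgt y hy) (lt_irrefl _)
        · exact PySem.Set.nodup_ofList _
        · intro a
          simp only [List.mem_cons, hmemSR, PySem.Set.mem_ofList, List.map_cons,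
            hsplit, List.map_append, List.mem_append]
          constructor
          · rintro (rfl | ha)
            · left; rfl
            · right; right; exact ha
          · rintro (rfl | ha | ha)
            · left; rfl
            · left
              rcases List.mem_map.mp ha with ⟨y, hy, hkey⟩
              exact (hkey ▸ hrunkey y hy :)
            · right; exact ha
      · refine List.pairwise_cons.mpr ⟨?_, ?_⟩
        · intro a ha
          rcases List.mem_map.mp ((hmemSR _).mp ha) with ⟨y, hy, hkey⟩
          exact hkey ▸ hgt y hy
        · have hle := PySem.List.sorted_pairwise (PySem.Set.ofList (rest.map key)) (fun s => s)
          exact (hle.and hsortedRest_nodup).imp (fun hab => lt_of_le_of_ne hab.1 hab.2)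
    have hfilter_x : (x :: xs).filter (fun r => key r == key x) = x :: run := by
      rw [hsplit, List.filter_cons]
      simp only [beq_self_eq_true, if_pos, List.filter_append]
      rw [List.filter_eq_self.mpr (fun y hy => by simp [hrunkey y hy]),
          List.filter_eq_nil_iff.mpr (fun y hy => by
            simp only [beq_iff_eq]
            exact (ne_of_gt (hgt y hy)))]
      simp
    have hfilter_rest : ∀ k, key x < k →
        (x :: xs).filter (fun r => key r == k) = rest.filter (fun r => key r == k) := by
      intro k hk
      rw [hsplit, List.filter_cons]
      have : (key x == k) = false := by simp only [beq_eq_false_iff_ne, ne_eq]; exact ne_of_lt hk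
      rw [if_neg (by simp [this]), List.filter_append,
          List.filter_eq_nil_iff.mpr (fun y hy => by
            simp [hrunkey y hy]; exact ne_of_lt hk)]
      simp
    rw [runsBy, hs]
    simp only [List.map_cons]
    rw [hfilter_x]
    rw [ih hrest]
    congr 1
    apply List.map_congr_left
    intro k hk
    rcases List.mem_map.mp ((hmemSR _).mp hk) with ⟨y, hy, hkey⟩
    rw [hfilter_rest k (hkey ▸ hgt y hy)]


theorem sortedSet_congr {u v : List String} (h : u.Perm v) :
    PySem.List.sorted (PySem.Set.ofList u) (fun s => s) false
      = PySem.List.sorted (PySem.Set.ofList v) (fun s => s) false := by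
  apply PySem.List.sorted_eq_of_perm_of_pairwise_lt
  · refine ((List.perm_ext_iff_of_nodup ?_ ?_).mpr ?_)
    · exact ((PySem.List.sorted_perm _ _ false).nodup_iff).mpr (PySem.Set.nodup_ofList v)
    · exact PySem.Set.nodup_ofList u
    · intro a
      rw [(PySem.List.sorted_perm _ _ false).mem_iff, PySem.Set.mem_ofList,
          PySem.Set.mem_ofList, h.mem_iff]
  · have hle := PySem.List.sorted_pairwise (PySem.Set.ofList v) (fun s => s)
    have hnd : (PySem.List.sorted (PySem.Set.ofList v) (fun s => s) false).Nodup :=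
      ((PySem.List.sorted_perm _ _ false).nodup_iff).mpr (PySem.Set.nodup_ofList v)
    exact (hle.and hnd).imp (fun hab => lt_of_le_of_ne hab.1 hab.2)

theorem format_wecom_source_runs_py_spec_aux (xs : List (String × String × Int)) :
    format_wecom_source_runs_py xs = format_wecom_source_runs_py_alt xs := by
  -- B side: normalise and switch to the lexicographic key
  have hmap : xs.map normRow = xs := by
    rw [List.map_congr_left (fun r _ => by
      rcases r with ⟨a, b, c⟩
      simp only [normRow]
      by_cases h : c = 0 <;> simp [h] : ∀ r ∈ xs, normRow r = r)]
    exact List.map_id xs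
  have hB : format_wecom_source_runs_py_alt xs
      = emitLines 1 (runsBy (fun r => r.1)
          (PySem.List.sorted xs (fun r => toLex (r.1, r.2.1)) false)) := by
    rw [format_wecom_source_runs_py_alt, hmap, sorted2_eq_sorted_lex]
  set rows := PySem.List.sorted xs (fun r => toLex (r.1, r.2.1)) false with hrows
  have hperm : rows.Perm xs := PySem.List.sorted_perm _ _ false
  have hpl : rows.Pairwise (fun a b => toLex (a.1, a.2.1) ≤ toLex (b.1, b.2.1)) :=
    PySem.List.sorted_pairwise xs (fun r => toLex (r.1, r.2.1))
  have hpfst : rows.Pairwise (fun a b => a.1 ≤ b.1) := by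
    refine hpl.imp (fun hab => ?_)
    rcases Prod.Lex.le_iff.mp hab with h | h
    · exact le_of_lt (by simpa using h)
    · exact le_of_eq (by simpa using h.1)
  have houter := runsBy_eq (fun r => r.1) rows hpfst
  have hSmap : (rows.map (fun r => r.1)).Perm (xs.map (fun r => r.1)) :=
    hperm.map _
  have hS := sortedSet_congr hSmap
  -- A side
  have hstep : (fun (g : PySem.Dict String (PySem.Dict String Int)) (r : String × String × Int) =>
        g.modify r.1 PySem.Dict.empty
          (fun inner => inner.modify r.2.1 0 (· + (if r.2.2 == 0 then 0 else r.2.2))))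
      = (fun g r => g.modify r.1 PySem.Dict.empty
          (fun inner => inner.modify r.2.1 0 (· + r.2.2))) := by
    funext g r
    by_cases h : r.2.2 = 0 <;> simp [h]
  rw [format_wecom_source_runs_py]
  simp only [hstep]
  have hkeys : (xs.foldl (fun g r => g.modify r.1 PySem.Dict.empty
        (fun inner => inner.modify r.2.1 0 (· + r.2.2))) PySem.Dict.empty).keys
      = PySem.Set.ofList (xs.map (fun r => r.1)) := by
    rw [PySem.Dict.keys_foldl_modify_key xs (fun r => r.1) PySem.Dict.empty
        (fun _ r inner => inner.modify r.2.1 0 (· + r.2.2)) PySem.Dict.empty]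
    rw [PySem.Dict.keys_empty, PySem.Set.ofList_eq_foldl]
    rfl
  rw [hkeys]
  set S := PySem.List.sorted (PySem.Set.ofList (xs.map (fun r => r.1))) (fun s => s) false with hSdef
  rw [assemble S
      (fun i s =>
        PySem.Int.toStr i ++ ". " ++ escapeWeCom s ++ " | " ++
          escapeWeCom (PySem.Str.join " | "
            ((PySem.List.sorted ((xs.foldl (fun g r => g.modify r.1 PySem.Dict.empty
                (fun inner => inner.modify r.2.1 0 (· + r.2.2))) PySem.Dict.empty).getD s
                  PySem.Dict.empty).keys (fun t => t) false).map
              (fun t => t ++ " " ++ PySem.Int.toStr (((xs.foldl (fun g r =>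
                g.modify r.1 PySem.Dict.empty
                  (fun inner => inner.modify r.2.1 0 (· + r.2.2))) PySem.Dict.empty).getD s
                    PySem.Dict.empty).getD t 0)))))
      (fun s => rows.filter (fun r => r.1 == s))
      ?_ [] 1]
  · rw [hB, houter, hS, hSdef, List.nil_append]
  · intro s _ i
    have h1 : (rows.filter (fun r => r.1 == s)).Pairwise
        (fun a b => toLex (a.1, a.2.1) ≤ toLex (b.1, b.2.1)) :=
      List.Pairwise.sublist List.filter_sublist hpl
    have hpgrp : (rows.filter (fun r => r.1 == s)).Pairwise (fun a b => a.2.1 ≤ b.2.1) := by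
      refine h1.imp_of_mem ?_
      intro a b ha hb hab
      have ha' : a.1 = s := by simpa using (List.mem_filter.mp ha).2
      have hb' : b.1 = s := by simpa using (List.mem_filter.mp hb).2
      rcases Prod.Lex.le_iff.mp hab with h | h
      · exfalso
        have hlt : a.1 < b.1 := by simpa using h
        rw [ha', hb'] at hlt
        exact lt_irrefl s hlt
      · simpa using h.2
    have hinner := runsBy_eq (fun r => r.2.1) (rows.filter (fun r => r.1 == s)) hpgrp
    have hpermg : (rows.filter (fun r => r.1 == s)).Perm (xs.filter (fun r => r.1 == s)) :=
      hperm.filter _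
    have hT := sortedSet_congr (hpermg.map (fun r => r.2.1))
    have hkeys2 : ((xs.filter (fun r => r.1 == s)).foldl
          (fun d r => d.modify r.2.1 0 (· + r.2.2)) PySem.Dict.empty).keys
        = PySem.Set.ofList ((xs.filter (fun r => r.1 == s)).map (fun r => r.2.1)) := by
      have hk := PySem.Dict.keys_foldl_modify_key (xs.filter (fun r => r.1 == s))
        (fun r => r.2.1) (0 : Int) (fun _ r v => v + r.2.2) PySem.Dict.empty
      rw [show ((xs.filter (fun r => r.1 == s)).foldl
            (fun d r => d.modify r.2.1 0 (· + r.2.2)) PySem.Dict.empty).keys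
          = PySem.Set.update PySem.Dict.empty.keys
              ((xs.filter (fun r => r.1 == s)).map (fun r => r.2.1)) from hk]
      rw [PySem.Dict.keys_empty, PySem.Set.ofList_eq_foldl]
      rfl
    beta_reduce
    rw [mkLine, hinner, List.map_map, hT]
    rw [getD_grouped, PySem.Dict.getD_empty, hkeys2]
    congr 3
    apply List.map_congr_left
    intro t _
    rw [getD_inner, PySem.Dict.getD_empty, zero_add]
    have hsum : ((((xs.filter (fun r => r.1 == s)).filter (fun r => r.2.1 == t)).map
          (fun r => r.2.2)).sum : Int)
        = (((rows.filter (fun r => r.1 == s)).filter (fun r => r.2.1 == t)).map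
          (fun r => r.2.2)).sum :=
      (((hpermg.filter _).map _).sum_eq).symm
    rw [hsum]
    rfl

-- ===== VERDICT (by name: the statement is the Claim_ definition above) =====
theorem format_wecom_source_runs_py_spec : Claim_equal_format_wecom_source_runs_py := by
  intro source_runs _
  exact format_wecom_source_runs_py_spec_aux source_runs
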